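-- pv_equiv track=rewrite | github.com/andreas1612/326quiz2 | sample test/omada d_b/omada d_b/epl326_solver_telos.py | crack_caesar_all_alphabets
-- ===== SOURCE A (Python) =====
-- ALPHABETS = {
--     '1':  'abcdefghijklmnopqrstuvwxyz',
--     '2':  'abcdefghijklmnopqrstuvwxyz ',
--     '3':  ' abcdefghijklmnopqrstuvwxyz',
--     '4':  ',. abcdefghijklmnopqrstuvwxyz',
--     '5':  ' -,.abcdefghijklmnopqrstuvwxyz',
--     '6':  '-., abcdefghijklmnopqrstuvwxyz',
--     '7':  ',.- abcdefghijklmnopqrstuvwxyz',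
--     '8':  ',-. abcdefghijklnmopqrstuvwxyz',
--     '9':  '.,- abcdefghijklmnopqrstuvwxyz',
--     '10': 'ABCDEFGHIJKLMNOPQRSTUVWXYZabcdefghijklmnopqrstuvwxyz0123456789 -,.',
--     '11': ' abcdefghijklmnopqrstuvwxyz:,.',
--     '12': '0123456789,.%() ABCDEFGHIJKLMNOPQRSTUVWXYZabcdefghijklmnopqrstuvwxyz',
--     '13': '0123456789.,%(  ABCDEFGHIJKLMNOPQRSTUVWXYZabcdefghijklmnopqrstuvwxyz',
--     '14': 'ABCDEFGHIJKLMNOPQRSTUVWXYZ0123456789 abcdefghijklmnopqrstuvwxyz',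
--     '15': 'abcdefghijklmnopqrstuvwxyzABCDEFGHIJKLMNOPQRSTUVWXYZ0123456789,.%()- ',
--     '16': 'abcdefghijklmnopqrstuvwxyz,.! ',
--     '17': 'abcdefghijklmnopqrstuvwxyz!,. ',
--     '18': 'abcdefghijklmnopqrstuvwxyz0123456789,.! ',
--     '19': 'abcdefghijklmnopqrstuvwxyz0123456789,!. ',
--     '20': '0123456789,. abcdefghijklmnopqrstuvwxyz',
--     '21': '0123456789 .,!abcdefghijklmnopqrstuvwxyz',
-- }
--
-- COMMON_WORDS = ['the','and','you','are','for','key','aes','secret','token',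
--                 'stop','congratulations','solution','passphrase','reveal',
--                 'magic','decrypt','submit','found','your','use','flag',
--                 'this','have','with','that','from','they','will','been']
--
-- def score_text(text):
--     t = text.lower()
--     return sum(1 for w in COMMON_WORDS if w in t)
--
-- def caesar_decrypt(text, key, alphabet):
--     alpha = list(alphabet)
--     result = ""
--     for char in text:
--         if char in alpha:
--             result += alpha[(alpha.index(char) - key) % len(alpha)]
--         elif char.lower() in alpha:
--             result += alpha[(alpha.index(char.lower()) - key) % len(alpha)].upper()
--         else:
--             result += char
--     return result
--
-- def crack_caesar_all_alphabets(ciphertext):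
--     results = []
--     for alpha_id, alphabet in ALPHABETS.items():
--         for key in range(1, len(alphabet)):
--             dec = caesar_decrypt(ciphertext, key, alphabet)
--             s = score_text(dec)
--             if s > 0:
--                 results.append((s, f"Caesar key={key} alpha={alpha_id}", dec))
--     results.sort(reverse=True)
--     return results[:10]
-- ===== SOURCE B (Python) =====
-- ALPHABETS = {
--     '1':  'abcdefghijklmnopqrstuvwxyz',
--     '2':  'abcdefghijklmnopqrstuvwxyz ',
--     '3':  ' abcdefghijklmnopqrstuvwxyz',
--     '4':  ',. abcdefghijklmnopqrstuvwxyz',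
--     '5':  ' -,.abcdefghijklmnopqrstuvwxyz',
--     '6':  '-., abcdefghijklmnopqrstuvwxyz',
--     '7':  ',.- abcdefghijklmnopqrstuvwxyz',
--     '8':  ',-. abcdefghijklnmopqrstuvwxyz',
--     '9':  '.,- abcdefghijklmnopqrstuvwxyz',
--     '10': 'ABCDEFGHIJKLMNOPQRSTUVWXYZabcdefghijklmnopqrstuvwxyz0123456789 -,.',
--     '11': ' abcdefghijklmnopqrstuvwxyz:,.',
--     '12': '0123456789,.%() ABCDEFGHIJKLMNOPQRSTUVWXYZabcdefghijklmnopqrstuvwxyz',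
--     '13': '0123456789.,%(  ABCDEFGHIJKLMNOPQRSTUVWXYZabcdefghijklmnopqrstuvwxyz',
--     '14': 'ABCDEFGHIJKLMNOPQRSTUVWXYZ0123456789 abcdefghijklmnopqrstuvwxyz',
--     '15': 'abcdefghijklmnopqrstuvwxyzABCDEFGHIJKLMNOPQRSTUVWXYZ0123456789,.%()- ',
--     '16': 'abcdefghijklmnopqrstuvwxyz,.! ',
--     '17': 'abcdefghijklmnopqrstuvwxyz!,. ',
--     '18': 'abcdefghijklmnopqrstuvwxyz0123456789,.! ',
--     '19': 'abcdefghijklmnopqrstuvwxyz0123456789,!. ',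
--     '20': '0123456789,. abcdefghijklmnopqrstuvwxyz',
--     '21': '0123456789 .,!abcdefghijklmnopqrstuvwxyz',
-- }
--
-- COMMON_WORDS = ['the','and','you','are','for','key','aes','secret','token',
--                 'stop','congratulations','solution','passphrase','reveal',
--                 'magic','decrypt','submit','found','your','use','flag',
--                 'this','have','with','that','from','they','will','been']
--
-- def crack_caesar_all_alphabets(ciphertext):
--     results = []
--     for alpha_id, alphabet in ALPHABETS.items():
--         n = len(alphabet)
--         # stage 1 (key-independent, once per alphabet): first-occurrence position map,
--         # then compile the ciphertext into a token stream: (position, needs_upper) for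
--         # translatable characters, the literal character otherwise.
--         pos = {}
--         for i, c in enumerate(alphabet):
--             pos.setdefault(c, i)
--         tokens = []
--         for c in ciphertext:
--             i = pos.get(c)
--             if i is not None:
--                 tokens.append((i, False))
--             else:
--                 j = pos.get(c.lower())
--                 if j is not None:
--                     tokens.append((j, True))
--                 else:
--                     tokens.append(c)
--         # stage 2 (per key): render the token stream through the rotation, no char lookups
--         for key in range(1, n):
--             out = []
--             for t in tokens:
--                 if isinstance(t, str):
--                     out.append(t)
--                 else:
--                     d = alphabet[(t[0] - key) % n]
--                     out.append(d.upper() if t[1] else d)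
--             dec = ''.join(out)
--             t2 = dec.lower()
--             s = sum(1 for w in COMMON_WORDS if w in t2)
--             if s > 0:
--                 results.append((s, f"Caesar key={key} alpha={alpha_id}", dec))
--     results.sort(reverse=True)
--     return results[:10]
-- ===== Notes on version B (the rewrite author's own statement) =====
-- stated objective: faster
-- what changed: A re-does the char classification (membership tests and alpha.index scans) for every key; B restructures the work into two stages per alphabet: one key-independent pass compiles the ciphertext into a token stream (first-occurrence position map built once, tokens = (position, needs_upper) or a literal char), and each key only renders that stream through the rotation arithmetic.
import Mathlib
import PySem

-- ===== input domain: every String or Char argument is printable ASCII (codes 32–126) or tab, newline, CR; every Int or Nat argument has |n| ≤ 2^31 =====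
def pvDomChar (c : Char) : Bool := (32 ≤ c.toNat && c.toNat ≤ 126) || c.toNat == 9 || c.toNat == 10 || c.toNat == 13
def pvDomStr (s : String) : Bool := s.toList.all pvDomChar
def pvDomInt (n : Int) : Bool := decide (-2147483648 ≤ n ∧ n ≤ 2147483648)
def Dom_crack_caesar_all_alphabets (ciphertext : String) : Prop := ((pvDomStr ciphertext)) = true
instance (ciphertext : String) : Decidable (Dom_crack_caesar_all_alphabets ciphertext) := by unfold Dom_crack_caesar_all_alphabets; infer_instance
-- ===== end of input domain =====

-- B restructures the crack into two stages per alphabet: a single key-independent pass compiles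
-- the ciphertext into a token stream (first-occurrence position + case flag, or a literal char),
-- and each key only renders that stream through the rotation — the per-key per-character
-- membership/index scans of A disappear; same results and ordering, measurably faster.

-- shared module constants (the dict ALPHABETS as an insertion-ordered association list)
def pvALPHABETS : List (String × String) := [
  ("1",  "abcdefghijklmnopqrstuvwxyz"),
  ("2",  "abcdefghijklmnopqrstuvwxyz "),
  ("3",  " abcdefghijklmnopqrstuvwxyz"),
  ("4",  ",. abcdefghijklmnopqrstuvwxyz"),
  ("5",  " -,.abcdefghijklmnopqrstuvwxyz"),
  ("6",  "-., abcdefghijklmnopqrstuvwxyz"),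
  ("7",  ",.- abcdefghijklmnopqrstuvwxyz"),
  ("8",  ",-. abcdefghijklnmopqrstuvwxyz"),
  ("9",  ".,- abcdefghijklmnopqrstuvwxyz"),
  ("10", "ABCDEFGHIJKLMNOPQRSTUVWXYZabcdefghijklmnopqrstuvwxyz0123456789 -,."),
  ("11", " abcdefghijklmnopqrstuvwxyz:,."),
  ("12", "0123456789,.%() ABCDEFGHIJKLMNOPQRSTUVWXYZabcdefghijklmnopqrstuvwxyz"),
  ("13", "0123456789.,%(  ABCDEFGHIJKLMNOPQRSTUVWXYZabcdefghijklmnopqrstuvwxyz"),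
  ("14", "ABCDEFGHIJKLMNOPQRSTUVWXYZ0123456789 abcdefghijklmnopqrstuvwxyz"),
  ("15", "abcdefghijklmnopqrstuvwxyzABCDEFGHIJKLMNOPQRSTUVWXYZ0123456789,.%()- "),
  ("16", "abcdefghijklmnopqrstuvwxyz,.! "),
  ("17", "abcdefghijklmnopqrstuvwxyz!,. "),
  ("18", "abcdefghijklmnopqrstuvwxyz0123456789,.! "),
  ("19", "abcdefghijklmnopqrstuvwxyz0123456789,!. "),
  ("20", "0123456789,. abcdefghijklmnopqrstuvwxyz"),
  ("21", "0123456789 .,!abcdefghijklmnopqrstuvwxyz")]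

def pvCOMMON_WORDS : List String :=
  ["the","and","you","are","for","key","aes","secret","token",
   "stop","congratulations","solution","passphrase","reveal",
   "magic","decrypt","submit","found","your","use","flag",
   "this","have","with","that","from","they","will","been"]

-- Python string '<' : code-point lexicographic (hand-ported; exact for all strings)
def pvCharsLt : List Char → List Char → Bool
  | _, [] => false
  | [], _ :: _ => true
  | a :: as, b :: bs => if a < b then true else if b < a then false else pvCharsLt as bs

-- Python tuple '<' on an (int, str, str) triple: lexicographic on the components
def pvTripleLt (a b : Int × String × String) : Bool :=
  if a.1 < b.1 then true
  else if b.1 < a.1 then false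
  else if pvCharsLt a.2.1.toList b.2.1.toList then true
  else if pvCharsLt b.2.1.toList a.2.1.toList then false
  else pvCharsLt a.2.2.toList b.2.2.toList

-- results.sort(reverse=True): stable descending insertion (ties are fully equal triples)
def pvSortRev (xs : List (Int × String × String)) : List (Int × String × String) :=
  xs.foldl (fun acc x => PySem.List.insertBy (fun a b => pvTripleLt b a) x acc) []

-- f"Caesar key={key} alpha={alpha_id}"
def pvLabel (key : Int) (aid : String) : String :=
  String.ofList ("Caesar key=".toList ++ (PySem.Int.toStr key).toList ++ " alpha=".toList ++ aid.toList)

-- ===== PORT A =====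
def score_text (text : String) : Int :=
  let t := PySem.Str.lower text
  pvCOMMON_WORDS.foldl (fun acc w => if PySem.Str.isIn w t then acc + 1 else acc) 0

-- one character of A's decryption loop (the if/elif/else chain)
def pvDecChar (alpha : List Char) (key : Int) (c : Char) : Char :=
  if alpha.contains c then
    PySem.List.pyGetD alpha
      (PySem.Int.mod ((((PySem.List.index? alpha c).getD 0 : Nat) : Int) - key) ((alpha.length : Nat) : Int)) ' '
  else if alpha.contains (PySem.Chars.lowerChar c) then
    PySem.Chars.upperChar (PySem.List.pyGetD alpha
      (PySem.Int.mod ((((PySem.List.index? alpha (PySem.Chars.lowerChar c)).getD 0 : Nat) : Int) - key) ((alpha.length : Nat) : Int)) ' ')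
  else c

def caesar_decrypt (text : String) (key : Int) (alphabet : String) : String :=
  String.ofList (text.toList.foldl (fun res c => res ++ [pvDecChar alphabet.toList key c]) [])

def crack_caesar_all_alphabets (ciphertext : String) : List (Int × String × String) :=
  let results := pvALPHABETS.foldl (fun results p =>
    (PySem.List.pyRange 1 (PySem.Str.len p.2) 1).foldl (fun results key =>
      let dec := caesar_decrypt ciphertext key p.2
      let s := score_text dec
      if s > 0 then results ++ [(s, pvLabel key p.1, dec)] else results) results)
    ([] : List (Int × String × String))
  PySem.List.slice (pvSortRev results) none (some (10 : Int))

-- ===== PORT B =====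
-- a compiled ciphertext token: a translatable char (first-occurrence position, needs-upper flag)
-- or a pass-through literal
inductive PvTok : Type
  | idx : Int → Bool → PvTok
  | lit : Char → PvTok
deriving DecidableEq, Repr

-- stage 1: the first-occurrence position map (pos.setdefault(c, i) over enumerate(alphabet))
def pvPos (alpha : List Char) : PySem.Dict Char Int :=
  (PySem.List.enumerate alpha 0).foldl (fun d q => d.setdefault q.2 q.1) PySem.Dict.empty

-- stage 1: one ciphertext character compiled to a token (pos.get with lower fallback)
def pvTokOf (pos : PySem.Dict Char Int) (c : Char) : PvTok :=
  match pos.get? c with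
  | some i => PvTok.idx i false
  | none =>
    match pos.get? (PySem.Chars.lowerChar c) with
    | some j => PvTok.idx j true
    | none => PvTok.lit c

-- stage 2: render one token through the rotation for a given key
def pvRender (alpha : List Char) (n key : Int) : PvTok → Char
  | PvTok.lit c => c
  | PvTok.idx i up =>
    let d := PySem.List.pyGetD alpha (PySem.Int.mod (i - key) n) ' '
    if up then PySem.Chars.upperChar d else d

def crack_caesar_all_alphabets_alt (ciphertext : String) : List (Int × String × String) :=
  let results := pvALPHABETS.foldl (fun results p =>
    let n := PySem.Str.len p.2
    let pos := pvPos p.2.toList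
    let tokens := ciphertext.toList.foldl (fun ts c => ts ++ [pvTokOf pos c]) []
    (PySem.List.pyRange 1 n 1).foldl (fun results key =>
      let dec := String.ofList (tokens.foldl (fun out t => out ++ [pvRender p.2.toList n key t]) [])
      let t2 := PySem.Str.lower dec
      let s := pvCOMMON_WORDS.foldl (fun acc w => if PySem.Str.isIn w t2 then acc + 1 else acc) (0 : Int)
      if s > 0 then results ++ [(s, pvLabel key p.1, dec)] else results) results)
    ([] : List (Int × String × String))
  PySem.List.slice (pvSortRev results) none (some (10 : Int))

-- ===== PRECONDITION & SPEC =====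
def Spec_crack_caesar_all_alphabets (ciphertext : String) (out : List (Int × String × String)) : Prop := out = crack_caesar_all_alphabets_alt ciphertext
instance (ciphertext : String) (out : List (Int × String × String)) : Decidable (Spec_crack_caesar_all_alphabets ciphertext out) := by unfold Spec_crack_caesar_all_alphabets; infer_instance

-- ===== CLAIM (what is proved, stated in full; the proofs are below) =====
def Claim_equal_crack_caesar_all_alphabets : Prop := ∀ (ciphertext : String), Dom_crack_caesar_all_alphabets ciphertext → Spec_crack_caesar_all_alphabets ciphertext (crack_caesar_all_alphabets ciphertext)

-- ===== LEMMAS AND PROOFS =====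

-- a setdefault loop over (value, key) pairs looks up as: existing entry, else first matching pair
theorem pv_get?_foldl_setdefault (ps : List (Int × Char)) (d : PySem.Dict Char Int) (c : Char) :
    (ps.foldl (fun t q => t.setdefault q.2 q.1) d).get? c
      = (d.get? c).or ((ps.find? (fun q => q.2 == c)).map (fun q => q.1)) := by
  induction ps generalizing d with
  | nil => simp
  | cons a ps ih =>
    simp only [List.foldl_cons]
    rw [ih]
    by_cases ha : a.2 = c
    · rw [List.find?_cons_of_pos (by simp [ha]), ha, PySem.Dict.get?_setdefault_self]
      cases hd : d.get? c <;> simp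
    · rw [List.find?_cons_of_neg (by simp [ha]),
        PySem.Dict.get?_setdefault_of_ne _ _ (fun hh => ha hh.symm)]

-- the first pair of enumerate(alpha, s) whose character is c sits at the first occurrence of c
theorem pv_find?_enumerate (alpha : List Char) (c : Char) (s : Int) :
    (PySem.List.enumerate alpha s).find? (fun q => q.2 == c)
      = (PySem.List.index? alpha c).map (fun (i : Nat) => (s + (i : Int), c)) := by
  induction alpha generalizing s with
  | nil => simp [PySem.List.index?]
  | cons x xs ih =>
    rw [PySem.List.enumerate_cons]
    by_cases hx : x = c
    · subst hx
      rw [PySem.List.index?_cons_self, List.find?_cons_of_pos (by simp)]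
      simp
    · rw [PySem.List.index?_cons_of_ne xs hx,
        List.find?_cons_of_neg (by simp [hx]), ih (s + 1)]
      cases PySem.List.index? xs c with
      | none => simp
      | some i =>
        simp only [Option.map_some, Option.some.injEq, Prod.mk.injEq]
        refine ⟨by push_cast; ring, trivial⟩


-- the position map is exactly list.index as a dictionary
theorem pv_get?_pvPos (alpha : List Char) (c : Char) :
    (pvPos alpha).get? c = (PySem.List.index? alpha c).map (fun (i : Nat) => (i : Int)) := by
  unfold pvPos
  rw [pv_get?_foldl_setdefault, PySem.Dict.get?_empty, Option.none_or,
    pv_find?_enumerate alpha c 0]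
  cases PySem.List.index? alpha c <;> simp

-- the core: A's per-character branch chain equals B's compile-then-render, for every char and key
theorem pv_char_eq (alpha : List Char) (key : Int) (c : Char) :
    pvDecChar alpha key c
      = pvRender alpha ((alpha.length : Nat) : Int) key (pvTokOf (pvPos alpha) c) := by
  unfold pvTokOf
  rw [pv_get?_pvPos, pv_get?_pvPos]
  by_cases hmem : c ∈ alpha
  · obtain ⟨i, hidx⟩ := Option.isSome_iff_exists.mp ((PySem.List.index?_isSome_iff alpha c).mpr hmem)
    rw [hidx]
    simp only [Option.map_some]
    unfold pvDecChar pvRender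
    rw [if_pos (by simpa using hmem), hidx]
    simp
  · have hnone : PySem.List.index? alpha c = none := (PySem.List.index?_eq_none_iff alpha c).mpr hmem
    rw [hnone]
    simp only [Option.map_none]
    by_cases hmem2 : PySem.Chars.lowerChar c ∈ alpha
    · obtain ⟨j, hidx2⟩ := Option.isSome_iff_exists.mp
        ((PySem.List.index?_isSome_iff alpha (PySem.Chars.lowerChar c)).mpr hmem2)
      rw [hidx2]
      simp only [Option.map_some]
      unfold pvDecChar pvRender
      rw [if_neg (by simpa using hmem), if_pos (by simpa using hmem2), hidx2]
      simp
    · have hnone2 : PySem.List.index? alpha (PySem.Chars.lowerChar c) = none :=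
        (PySem.List.index?_eq_none_iff alpha _).mpr hmem2
      rw [hnone2]
      simp [pvDecChar, pvRender, hmem, hmem2]

-- whole-text version: A's decryption equals B's render of the compiled token stream
theorem pv_dec_eq (text : String) (key : Int) (alphabet : String) :
    caesar_decrypt text key alphabet
      = String.ofList ((text.toList.foldl (fun ts c => ts ++ [pvTokOf (pvPos alphabet.toList) c]) []).foldl
          (fun out t => out ++ [pvRender alphabet.toList ((alphabet.toList.length : Nat) : Int) key t]) []) := by
  unfold caesar_decrypt
  rw [PySem.List.foldl_append_singleton_eq_map, PySem.List.foldl_append_singleton_eq_map,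
    PySem.List.foldl_append_singleton_eq_map, List.nil_append, List.nil_append, List.nil_append,
    List.map_map]
  congr 1
  apply List.map_congr_left
  intro c _
  exact pv_char_eq alphabet.toList key c

-- ===== VERDICT (by name: the statement is the Claim_ definition above) =====
theorem crack_caesar_all_alphabets_spec : Claim_equal_crack_caesar_all_alphabets := by
  intro ciphertext _
  unfold Spec_crack_caesar_all_alphabets
  simp only [crack_caesar_all_alphabets, crack_caesar_all_alphabets_alt, PySem.Str.len_eq]
  refine congrArg (fun r => PySem.List.slice (pvSortRev r) none (some (10 : Int))) ?_
  apply PySem.List.foldl_congr_mem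
  intro acc p _
  apply PySem.List.foldl_congr_mem
  intro acc2 key _
  rw [pv_dec_eq ciphertext key p.2]
  simp only [score_text]
  rfl
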